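-- pv_equiv track=rewrite | github.com/Manitary/aquaq-challenge | src/p38.py | comfort_score
-- ===== SOURCE A (Python) =====
-- def comfort_score(nums: tuple[int, ...], pos: int) -> int:
--     n = len(nums)
--     for l in range(1, n):
--         s = 0
--         for left in range(max(0, pos - l + 1), min(pos + 1, n - l + 1)):
--             if left == max(0, pos - l + 1):
--                 s = sum(nums[left : left + l])
--             else:
--                 s += nums[left + l - 1] - nums[left - 1]
--             if s % l == 0:
--                 break
--         else:
--             return l - 1
--     return n
-- ===== SOURCE B (Python) =====
-- def comfort_score(nums, pos):
--     n = len(nums)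
--     pre = [0]
--     for x in nums:
--         pre.append(pre[-1] + x)
--     bad = set()
--     for left in range(0, min(pos + 1, n)):
--         for right in range(pos, n):
--             l = right - left + 1
--             if l <= n - 1 and (pre[right + 1] - pre[left]) % l == 0:
--                 bad.add(l)
--     for l in range(1, n):
--         if l not in bad:
--             return l - 1
--     return n
-- ===== Notes on version B (the rewrite author's own statement) =====
-- stated objective: alternative
-- what changed: B enumerates covering windows by their (left,right) endpoints in one staged pass, marking every length with a divisible window in a set (sums via a prefix table), then scans lengths 1..n-1 for the first unmarked one; A instead loops per length with a sliding accumulator and a for/else break.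
import Mathlib
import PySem

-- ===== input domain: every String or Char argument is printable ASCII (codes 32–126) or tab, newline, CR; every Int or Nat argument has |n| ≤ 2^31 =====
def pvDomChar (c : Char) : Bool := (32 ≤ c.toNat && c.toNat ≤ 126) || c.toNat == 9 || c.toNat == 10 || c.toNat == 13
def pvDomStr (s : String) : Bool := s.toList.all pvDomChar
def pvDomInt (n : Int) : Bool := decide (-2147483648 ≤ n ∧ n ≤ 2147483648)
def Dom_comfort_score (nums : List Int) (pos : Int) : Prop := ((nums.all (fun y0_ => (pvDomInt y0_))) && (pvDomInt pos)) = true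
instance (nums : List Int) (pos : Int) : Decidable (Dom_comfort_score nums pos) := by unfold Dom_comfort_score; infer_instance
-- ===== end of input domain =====

-- B replaces A's per-length loop with sliding accumulator and for/else break by a single
-- staged pass over window endpoints marking divisible lengths in a set, then a scan.

-- ===== PORT A =====
-- inner for-loop of A: returns true iff the loop breaks (some window sum divisible by l)
def pvInnerA (nums : List Int) (l lo : Int) (lefts : List Int) (s : Int) : Bool :=
  match lefts with
  | [] => false
  | left :: rest =>
    let s' := if left = lo
      then (PySem.List.slice nums (some left) (some (left + l))).sum
      else s + (PySem.List.pyGetD nums (left + l - 1) 0 - PySem.List.pyGetD nums (left - 1) 0)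
    if PySem.Int.mod s' l = 0 then true else pvInnerA nums l lo rest s'

-- outer for-loop of A: for/else — if the inner loop did not break, return l - 1
def pvOuterA (nums : List Int) (pos n : Int) (ls : List Int) : Int :=
  match ls with
  | [] => n
  | l :: rest =>
    let lo := max 0 (pos - l + 1)
    let hi := min (pos + 1) (n - l + 1)
    if pvInnerA nums l lo (PySem.List.pyRange lo hi 1) 0 then pvOuterA nums pos n rest
    else l - 1

def comfort_score (nums : List Int) (pos : Int) : Int :=
  let n : Int := nums.length
  pvOuterA nums pos n (PySem.List.pyRange 1 n 1)

-- ===== PORT B =====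
-- prefix-sum table: pre = [0]; for x in nums: pre.append(pre[-1] + x)
def pvBuildPre (nums : List Int) : List Int :=
  nums.foldl (fun pre x => pre ++ [PySem.List.pyGetD pre (-1) 0 + x]) [0]

-- bad = set(); for left in range(0, pos+1): for right in range(pos, n): mark l if divisible
def pvBadSet (pre : List Int) (n pos : Int) : PySem.Set Int :=
  (PySem.List.pyRange 0 (min (pos + 1) (n : Int)) 1).foldl (fun bad left =>
    (PySem.List.pyRange pos n 1).foldl (fun bad right =>
      if right - left + 1 ≤ n - 1 ∧
         PySem.Int.mod (PySem.List.pyGetD pre (right + 1) 0 - PySem.List.pyGetD pre left 0)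
           (right - left + 1) = 0
      then PySem.Set.add bad (right - left + 1) else bad) bad) PySem.Set.empty

-- for l in range(1, n): if l not in bad: return l - 1;  return n
def pvScanB (bad : PySem.Set Int) (n : Int) (ls : List Int) : Int :=
  match ls with
  | [] => n
  | l :: rest => if PySem.Set.contains bad l then pvScanB bad n rest else l - 1

def comfort_score_alt (nums : List Int) (pos : Int) : Int :=
  let n : Int := nums.length
  let pre := pvBuildPre nums
  pvScanB (pvBadSet pre n pos) n (PySem.List.pyRange 1 n 1)

-- ===== PRECONDITION & SPEC =====
def Spec_comfort_score (nums : List Int) (pos : Int) (out : Int) : Prop := out = comfort_score_alt nums pos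
instance (nums : List Int) (pos : Int) (out : Int) : Decidable (Spec_comfort_score nums pos out) := by unfold Spec_comfort_score; infer_instance

-- ===== CLAIM =====
def Claim_equal_comfort_score : Prop := ∀ (nums : List Int) (pos : Int), Dom_comfort_score nums pos → Spec_comfort_score nums pos (comfort_score nums pos)

-- ===== LEMMAS AND PROOFS =====

-- pvP nums i = sum of the first i elements of nums
def pvP (nums : List Int) (i : Int) : Int := ((nums.take i.toNat).sum : Int)

theorem pvBuildPre_eq (nums : List Int) :
    pvBuildPre nums = (List.range (nums.length + 1)).map (fun k => ((nums.take k).sum : Int)) := by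
  induction nums using List.reverseRecOn with
  | nil => simp [pvBuildPre]
  | append_singleton xs x ih =>
    have hstep : pvBuildPre (xs ++ [x])
        = pvBuildPre xs ++ [PySem.List.pyGetD (pvBuildPre xs) (-1) 0 + x] := by
      simp [pvBuildPre, List.foldl_append]
    have hne : pvBuildPre xs ≠ [] := by rw [ih]; simp
    have hlast : PySem.List.pyGetD (pvBuildPre xs) (-1) 0 = xs.sum := by
      rw [PySem.List.pyGetD_neg_one _ _ hne, List.getLast_eq_getElem]
      simp [ih]
    have hrhs : (List.range ((xs ++ [x]).length + 1)).map (fun k => (((xs ++ [x]).take k).sum : Int))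
        = (List.range (xs.length + 1)).map (fun k => (((xs ++ [x]).take k).sum : Int)) ++ [((xs ++ [x]).sum : Int)] := by
      rw [show (xs ++ [x]).length + 1 = (xs.length + 1) + 1 by simp, List.range_succ, List.map_append]
      simp
    rw [hstep, hlast, ih, hrhs]
    congr 1
    · apply List.map_congr_left
      intro k hk
      simp only [List.mem_range] at hk
      rw [List.take_append_of_le_length (by omega)]
    · simp

theorem pvPre_getD (nums : List Int) (i : Int) (h0 : 0 ≤ i) (hn : i ≤ nums.length) :
    PySem.List.pyGetD (pvBuildPre nums) i 0 = pvP nums i := by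
  rw [pvBuildPre_eq, PySem.List.pyGetD_of_nonneg _ _ h0]
  rw [List.getD_eq_getElem?_getD, List.getElem?_map, List.getElem?_range (by omega)]
  rfl

theorem pvSlice_sum (nums : List Int) (a l : Int) (h0 : 0 ≤ a) (hl : 0 ≤ l) :
    (PySem.List.slice nums (some a) (some (a + l))).sum = pvP nums (a + l) - pvP nums a := by
  rw [PySem.List.slice_toNat _ h0 (by omega)]
  unfold pvP
  obtain ⟨m, hm⟩ : ∃ m, (a+l).toNat = a.toNat + m := ⟨(a+l).toNat - a.toNat, by omega⟩
  rw [hm, Nat.add_sub_cancel_left, List.take_add, List.sum_append]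
  ring

theorem pvP_succ (nums : List Int) (i : Int) (h0 : 0 ≤ i) (hn : i < nums.length) :
    pvP nums (i + 1) = pvP nums i + PySem.List.pyGetD nums i 0 := by
  unfold pvP
  rw [show (i+1).toNat = i.toNat + 1 by omega]
  rw [List.sum_take_succ _ _ (by omega)]
  rw [PySem.List.pyGetD_eq_getElem _ _ h0 hn]

-- A's inner loop breaks iff some window sum (expressed through prefix sums) is divisible by l
theorem pvInnerA_eq (nums : List Int) (l lo hi : Int) (hl : 1 ≤ l) (hlo : 0 ≤ lo)
    (hhi : hi ≤ (nums.length : Int) - l + 1) :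
    ∀ k (a s : Int), (hi - a).toNat = k → lo ≤ a →
      (a = lo ∨ s = pvP nums (a - 1 + l) - pvP nums (a - 1)) →
      (pvInnerA nums l lo (PySem.List.pyRange a hi 1) s = true
        ↔ ∃ left, a ≤ left ∧ left < hi ∧ PySem.Int.mod (pvP nums (left + l) - pvP nums left) l = 0) := by
  intro k
  induction k with
  | zero =>
    intro a s hk ha hs
    rw [PySem.List.pyRange_one_eq_nil (by omega)]
    simp only [pvInnerA, Bool.false_eq_true, false_iff]
    rintro ⟨left, h1, h2, -⟩; omega
  | succ k ih =>
    intro a s hk ha hs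
    have hab : a < hi := by omega
    rw [PySem.List.pyRange_one_cons hab]
    have hs' : (if a = lo
        then (PySem.List.slice nums (some a) (some (a + l))).sum
        else s + (PySem.List.pyGetD nums (a + l - 1) 0 - PySem.List.pyGetD nums (a - 1) 0))
        = pvP nums (a + l) - pvP nums a := by
      by_cases hcase : a = lo
      · rw [if_pos hcase]
        exact pvSlice_sum nums a l (by omega) (by omega)
      · rw [if_neg hcase]
        rcases hs with h | h
        · exact absurd h hcase
        · have e1' : pvP nums (a + l) = pvP nums (a + l - 1) + PySem.List.pyGetD nums (a + l - 1) 0 := by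
            have h' := pvP_succ nums (a + l - 1) (by omega) (by omega)
            rwa [show a + l - 1 + 1 = a + l by ring] at h'
          have e2' : pvP nums a = pvP nums (a - 1) + PySem.List.pyGetD nums (a - 1) 0 := by
            have h' := pvP_succ nums (a - 1) (by omega) (by omega)
            rwa [show a - 1 + 1 = a by ring] at h'
          rw [h, show a - 1 + l = a + l - 1 by ring, e1', e2']; ring
    show (pvInnerA nums l lo (a :: PySem.List.pyRange (a+1) hi 1) s = true) ↔ _
    unfold pvInnerA
    simp only [hs']
    by_cases hdiv : PySem.Int.mod (pvP nums (a + l) - pvP nums a) l = 0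
    · simp only [if_pos hdiv, true_iff]
      exact ⟨a, le_refl a, hab, hdiv⟩
    · rw [if_neg hdiv]
      rw [ih (a+1) (pvP nums (a + l) - pvP nums a) (by omega) (by omega)
            (Or.inr (by congr 1 <;> ring_nf))]
      constructor
      · rintro ⟨left, h1, h2, h3⟩; exact ⟨left, by omega, h2, h3⟩
      · rintro ⟨left, h1, h2, h3⟩
        refine ⟨left, ?_, h2, h3⟩
        rcases eq_or_lt_of_le h1 with rfl | h
        · exact absurd h3 hdiv
        · omega

-- membership in a fold that conditionally adds f b for each b of the list
theorem pv_mem_foldl_add {β : Type} (xs : List β) (f : β → Int) (p : β → Prop)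
    [DecidablePred p] (s : PySem.Set Int) (y : Int) :
    (y ∈ xs.foldl (fun s b => if p b then PySem.Set.add s (f b) else s) s)
      ↔ y ∈ s ∨ ∃ b ∈ xs, p b ∧ y = f b := by
  induction xs generalizing s with
  | nil => simp
  | cons b rest ih =>
    simp only [List.foldl_cons, ih]
    by_cases hp : p b
    · rw [if_pos hp, PySem.Set.mem_add]
      constructor
      · rintro (⟨h | h⟩ | h)
        · exact Or.inl h
        · exact Or.inr ⟨b, by simp, hp, h⟩
        · rcases h with ⟨c, hc, hpc, hy⟩; exact Or.inr ⟨c, by simp [hc], hpc, hy⟩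
      · rintro (h | ⟨c, hc, hpc, hy⟩)
        · exact Or.inl (Or.inl h)
        · rcases List.mem_cons.mp hc with rfl | hc
          · exact Or.inl (Or.inr hy)
          · exact Or.inr ⟨c, hc, hpc, hy⟩
    · rw [if_neg hp]
      constructor
      · rintro (h | ⟨c, hc, hpc, hy⟩)
        · exact Or.inl h
        · exact Or.inr ⟨c, by simp [hc], hpc, hy⟩
      · rintro (h | ⟨c, hc, hpc, hy⟩)
        · exact Or.inl h
        · rcases List.mem_cons.mp hc with rfl | hc
          · exact absurd hpc hp
          · exact Or.inr ⟨c, hc, hpc, hy⟩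

-- characterisation of B's marked set
theorem pvBadSet_mem (pre : List Int) (n pos y : Int) :
    (y ∈ pvBadSet pre n pos)
      ↔ ∃ left, 0 ≤ left ∧ left < min (pos + 1) n ∧ ∃ r, pos ≤ r ∧ r < n ∧
          (r - left + 1 ≤ n - 1 ∧
           PySem.Int.mod (PySem.List.pyGetD pre (r + 1) 0 - PySem.List.pyGetD pre left 0)
             (r - left + 1) = 0) ∧ y = r - left + 1 := by
  unfold pvBadSet
  have hout : ∀ (lefts : List Int) (s : PySem.Set Int),
      (y ∈ lefts.foldl (fun bad left =>
        (PySem.List.pyRange pos n 1).foldl (fun bad right =>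
          if right - left + 1 ≤ n - 1 ∧
             PySem.Int.mod (PySem.List.pyGetD pre (right + 1) 0 - PySem.List.pyGetD pre left 0)
               (right - left + 1) = 0
          then PySem.Set.add bad (right - left + 1) else bad) bad) s)
      ↔ y ∈ s ∨ ∃ left ∈ lefts, ∃ r ∈ PySem.List.pyRange pos n 1,
          (r - left + 1 ≤ n - 1 ∧
           PySem.Int.mod (PySem.List.pyGetD pre (r + 1) 0 - PySem.List.pyGetD pre left 0)
             (r - left + 1) = 0) ∧ y = r - left + 1 := by
    intro lefts
    induction lefts with
    | nil => simp
    | cons a rest ih =>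
      intro s
      simp only [List.foldl_cons, ih, List.mem_cons]
      rw [pv_mem_foldl_add (PySem.List.pyRange pos n 1)
        (fun r => r - a + 1)
        (fun r => r - a + 1 ≤ n - 1 ∧
           PySem.Int.mod (PySem.List.pyGetD pre (r + 1) 0 - PySem.List.pyGetD pre a 0)
             (r - a + 1) = 0) s y]
      constructor
      · rintro ((h | ⟨r, hr, hc, hy⟩) | ⟨left, hl, h⟩)
        · exact Or.inl h
        · exact Or.inr ⟨a, Or.inl rfl, r, hr, hc, hy⟩
        · exact Or.inr ⟨left, Or.inr hl, h⟩
      · rintro (h | ⟨left, (rfl | hl), h⟩)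
        · exact Or.inl (Or.inl h)
        · rcases h with ⟨r, hr, hc, hy⟩; exact Or.inl (Or.inr ⟨r, hr, hc, hy⟩)
        · exact Or.inr ⟨left, hl, h⟩
  rw [hout]
  simp only [PySem.List.mem_pyRange_one]
  constructor
  · rintro (h | ⟨left, ⟨h0, h1⟩, r, ⟨h2, h3⟩, hc, hy⟩)
    · cases h
    · exact ⟨left, h0, h1, r, h2, h3, hc, hy⟩
  · rintro ⟨left, h0, h1, r, h2, h3, hc, hy⟩
    exact Or.inr ⟨left, ⟨h0, h1⟩, r, ⟨h2, h3⟩, hc, hy⟩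

-- for 1 ≤ l < n, l is marked iff some window of A's left-range for l has divisible sum
theorem pvBad_iff (nums : List Int) (pos l : Int) (hl : 1 ≤ l) (hln : l ≤ (nums.length : Int) - 1) :
    (l ∈ pvBadSet (pvBuildPre nums) (nums.length) pos)
      ↔ ∃ left, max 0 (pos - l + 1) ≤ left ∧ left < min (pos + 1) ((nums.length : Int) - l + 1) ∧
          PySem.Int.mod (pvP nums (left + l) - pvP nums left) l = 0 := by
  rw [pvBadSet_mem]
  constructor
  · rintro ⟨left, h0, h1, r, h2, h3, ⟨hc1, hc2⟩, hy⟩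
    refine ⟨left, by omega, by omega, ?_⟩
    rw [pvPre_getD nums (r + 1) (by omega) (by omega), pvPre_getD nums left (by omega) (by omega)] at hc2
    have : r + 1 = left + l := by omega
    rw [this] at hc2
    have : r - left + 1 = l := by omega
    rwa [this] at hc2
  · rintro ⟨left, h0, h1, hc⟩
    refine ⟨left, by omega, by omega, left + l - 1, by omega, by omega, ⟨by omega, ?_⟩, by omega⟩
    rw [pvPre_getD nums (left + l - 1 + 1) (by omega) (by omega),
        pvPre_getD nums left (by omega) (by omega)]
    have e1 : left + l - 1 + 1 = left + l := by omega
    have e2 : left + l - 1 - left + 1 = l := by omega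
    rw [e1, e2]
    exact hc

theorem pvOuter_eq (nums : List Int) (pos : Int) :
    ∀ k (a : Int), ((nums.length : Int) - a).toNat = k → 1 ≤ a →
      pvOuterA nums pos (nums.length) (PySem.List.pyRange a (nums.length) 1)
        = pvScanB (pvBadSet (pvBuildPre nums) (nums.length) pos) (nums.length)
            (PySem.List.pyRange a (nums.length) 1) := by
  intro k
  induction k with
  | zero =>
    intro a hk ha
    rw [PySem.List.pyRange_one_eq_nil (by omega)]
    rfl
  | succ k ih =>
    intro a hk ha
    have hab : a < (nums.length : Int) := by omega
    have hk' : ((nums.length : Int) - (a + 1)).toNat = k := by omega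
    have ha' : (1 : Int) ≤ a + 1 := by omega
    rw [PySem.List.pyRange_one_cons hab]
    have hinner := pvInnerA_eq nums a (max 0 (pos - a + 1)) (min (pos + 1) ((nums.length : Int) - a + 1))
      ha (by omega) (by omega)
      ((min (pos + 1) ((nums.length : Int) - a + 1) - max 0 (pos - a + 1)).toNat)
      (max 0 (pos - a + 1)) 0 rfl (le_refl _) (Or.inl rfl)
    have hbad := pvBad_iff nums pos a ha (by omega)
    have hiff : pvInnerA nums a (max 0 (pos - a + 1))
        (PySem.List.pyRange (max 0 (pos - a + 1)) (min (pos + 1) ((nums.length : Int) - a + 1)) 1) 0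
        = PySem.Set.contains (pvBadSet (pvBuildPre nums) (nums.length) pos) a := by
      apply Bool.eq_iff_iff.mpr
      rw [hinner, ← hbad]
      simp [PySem.Set.contains]
    show (if pvInnerA nums a (max 0 (pos - a + 1))
        (PySem.List.pyRange (max 0 (pos - a + 1)) (min (pos + 1) ((nums.length : Int) - a + 1)) 1) 0
      then pvOuterA nums pos (nums.length) (PySem.List.pyRange (a + 1) (nums.length) 1)
      else a - 1) = _
    rw [hiff]
    show _ = (if PySem.Set.contains (pvBadSet (pvBuildPre nums) (nums.length) pos) a
      then pvScanB (pvBadSet (pvBuildPre nums) (nums.length) pos) (nums.length)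
            (PySem.List.pyRange (a + 1) (nums.length) 1)
      else a - 1)
    rw [ih (a + 1) hk' ha']

-- ===== VERDICT =====
theorem comfort_score_spec : Claim_equal_comfort_score := by
  intro nums pos _
  unfold Spec_comfort_score comfort_score comfort_score_alt
  exact pvOuter_eq nums pos _ 1 rfl (le_refl 1)
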